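-- pv_equiv track=rewrite | github.com/Signetar/Subclip | main.py | syllable_identifier
-- ===== SOURCE A (Python) =====
-- def reconstruct(matrix):
--     alphabet = [char for char in "abcdefghijklmnopqrstuvwxyz"]
--     string = ""
--     for i in matrix:
--         string += alphabet[i[1]]
--     return string
--
-- def syllable_identifier(matrixdata):
--     name = matrixdata[0]
--     matrix = matrixdata[1]
--     #make a list named "word" that stores the first elements of tuples in the matrix
--     word = [x[0] for x in matrix]
--     final = []
--     final.append([])
--     for num in range(len(word)):
--         i = matrix[num]
--         c = i[0]
--         if c == 0:
--             final[-1].append(i)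
--         elif c == 1 and len(final[-1]) == 0:
--             final[-1].append(i)
--         elif c == 1 and final[-1][-1][0] == 0:
--             final[-1].append(i)
--             final.append([])
--         elif c == 1 and final[-1][-1][0] == 1:
--             final[-1].append(i)
--     for i in range(len(final)-1, -1, -1):
--         if len(final[i]) == 0:
--             del final[i]
--         elif len(final[i]) == 1:
--             x = final[i][0]
--             del final[i]
--             final[-1].append(x)
--     final_string = []
--     for i in final:
--         final_string.append(reconstruct(i))
--     return (final, final_string)
-- ===== SOURCE B (Python) =====
-- ALPHABET = "abcdefghijklmnopqrstuvwxyz"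
--
-- def reconstruct(matrix):
--     return "".join(ALPHABET[t[1]] for t in matrix)
--
-- def syllable_identifier(matrixdata):
--     # only tuples whose first component is 0 or 1 take part in the grouping
--     kept = [t for t in matrixdata[1] if t[0] in (0, 1)]
--     w = [t[0] for t in kept]
--     # a group ends right after a 1 that directly follows a 0: precompute the split points,
--     # then cut kept into consecutive slices between them
--     bounds = [0] + [k + 1 for k in range(1, len(w)) if w[k] == 1 and w[k - 1] == 0] + [len(w)]
--     pieces = [kept[a:b] for a, b in zip(bounds, bounds[1:])]
--     groups, tail = pieces[:-1], pieces[-1]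
--     # every piece but the last ends with a 0-then-1 pair, so only the tail can be short
--     if len(tail) == 1 and groups:
--         groups[-1] = groups[-1] + [tail[0]]
--     elif tail:
--         groups = groups + [tail]
--     return (groups, [reconstruct(g) for g in groups])
-- ===== Notes on version B (the rewrite author's own statement) =====
-- stated objective: alternative
-- what changed: A's stateful four-branch if/elif grouping loop plus a reverse index loop that mutates the list (del empty groups, merge singletons) is replaced by staged passes with no grouping state: precompute the split indices (each 1 directly following a 0), cut the kept tuples into slices between consecutive bounds via zip, and patch only the trailing slice.
-- crash fix: On matrices with exactly one tuple whose first component is 0 or 1 (letter index in range), A raises IndexError (final[-1] on an emptied list in the cleanup pass); B returns that tuple as a single group with its letter. — e.g. on syllable_identifier("", [(0, 0)]): A raises IndexError, B returns ([[(0, 0)]], ["a"])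
import Mathlib
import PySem

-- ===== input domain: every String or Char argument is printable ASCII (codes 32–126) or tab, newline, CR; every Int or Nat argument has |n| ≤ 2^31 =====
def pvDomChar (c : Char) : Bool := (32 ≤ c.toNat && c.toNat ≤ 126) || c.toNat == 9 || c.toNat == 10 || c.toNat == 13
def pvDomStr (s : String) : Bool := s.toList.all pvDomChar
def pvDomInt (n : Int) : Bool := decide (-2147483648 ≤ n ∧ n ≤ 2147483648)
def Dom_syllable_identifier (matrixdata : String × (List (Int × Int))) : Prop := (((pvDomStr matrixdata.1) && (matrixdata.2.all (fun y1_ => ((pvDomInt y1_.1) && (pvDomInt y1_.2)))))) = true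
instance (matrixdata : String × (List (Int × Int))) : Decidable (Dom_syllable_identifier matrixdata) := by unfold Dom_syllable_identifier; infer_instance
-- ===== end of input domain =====

-- B replaces A's stateful four-branch grouping loop plus reverse delete/merge mutation pass by
-- staged passes: precompute the split indices, cut the list into slices between consecutive
-- bounds, patch only the trailing slice (objective: alternative decomposition, same cost class).

-- ===== PORT A =====

-- `final[-1].append(x)`: append x to the last group (final is nonempty whenever A reaches this)
def pvAppendLast (l : List (List (Int × Int))) (x : Int × Int) : List (List (Int × Int)) :=
  match l with
  | [] => []
  | [g] => [g ++ [x]]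
  | g :: rest => g :: pvAppendLast rest x

-- reconstruct: string built by += over the rows; alphabet[i[1]] is Python indexing (negative
-- index wraps) → pyGet?; the ' ' default is never hit inside Pre_ (second components in [-26,25])
def pvA_reconstruct (matrix : List (Int × Int)) : String :=
  let alphabet := "abcdefghijklmnopqrstuvwxyz".toList
  String.mk (matrix.foldl (fun s i => s ++ [(PySem.List.pyGet? alphabet i.2).getD ' ']) [])

-- body of A's first loop: the four-branch if/elif chain on c = i[0] and final[-1]
def pvA_step (final : List (List (Int × Int))) (i : Int × Int) : List (List (Int × Int)) :=
  let c := i.1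
  let last := (final.getLast?).getD []
  if c == 0 then pvAppendLast final i
  else if c == 1 && last.length == 0 then pvAppendLast final i
  else if c == 1 && ((last.getLast?).getD (0, 0)).1 == 0 then pvAppendLast final i ++ [[]]
  else if c == 1 && ((last.getLast?).getD (0, 0)).1 == 1 then pvAppendLast final i
  else final

-- A's second loop `for i in range(len(final)-1, -1, -1)` with `del` / merge, as the downward
-- recursion on the index (index i stays valid: deletions only happen at positions ≥ i);
-- `final[-1].append(x)` after the `del` is pvAppendLast (no-op on [], which A's crash — outside Pre_)
def pvA_cleanup : Nat → List (List (Int × Int)) → List (List (Int × Int))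
  | 0, final => final
  | i + 1, final =>
    let g := final.getD i []
    let final' :=
      if g.length == 0 then final.eraseIdx i
      else if g.length == 1 then pvAppendLast (final.eraseIdx i) (g.getD 0 (0, 0))
      else final
    pvA_cleanup i final'

def syllable_identifier (matrixdata : String × (List (Int × Int))) : (List (List (Int × Int))) × List String :=
  let _name := matrixdata.1
  let matrix := matrixdata.2
  let word := matrix.map (fun x => x.1)
  -- for num in range(len(word)): i = matrix[num]; …
  let final := (PySem.List.pyRange 0 (word.length : Int) 1).foldl
      (fun final num => pvA_step final (PySem.List.pyGetD matrix num (0, 0))) [[]]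
  let final := pvA_cleanup final.length final
  let final_string := final.map pvA_reconstruct
  (final, final_string)

-- ===== PORT B =====

-- "".join(ALPHABET[t[1]] for t in matrix)
def pvB_reconstruct (g : List (Int × Int)) : String :=
  String.mk (g.map (fun t => (PySem.List.pyGet? "abcdefghijklmnopqrstuvwxyz".toList t.2).getD ' '))

-- [k + 1 for k in range(1, len(w)) if w[k] == 1 and w[k - 1] == 0]
def pvB_cuts (w : List Int) : List Int :=
  ((PySem.List.pyRange 1 (w.length : Int) 1).filter
    (fun k => PySem.List.pyGetD w k 0 == 1 && PySem.List.pyGetD w (k - 1) 0 == 0)).map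
    (fun k => k + 1)

def syllable_identifier_alt (matrixdata : String × (List (Int × Int))) : (List (List (Int × Int))) × List String :=
  let kept := matrixdata.2.filter (fun t => t.1 == 0 || t.1 == 1)
  let w := kept.map (fun t => t.1)
  -- bounds = [0] + [k+1 for k in range(1, len(w)) if w[k]==1 and w[k-1]==0] + [len(w)]
  let bounds : List Int := 0 :: (pvB_cuts w ++ [(w.length : Int)])
  -- pieces = [kept[a:b] for a, b in zip(bounds, bounds[1:])]
  let pieces := (bounds.zip bounds.tail).map
      (fun p => PySem.List.slice kept (some p.1) (some p.2))
  -- groups, tail = pieces[:-1], pieces[-1]   (pieces is never empty)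
  let groups := pieces.dropLast
  let tail := pieces.getLastD []
  let groups :=
    if tail.length == 1 && !groups.isEmpty then
      -- groups[-1] = groups[-1] + [tail[0]]
      groups.dropLast ++ [groups.getLastD [] ++ [tail.headD (0, 0)]]
    else if !tail.isEmpty then groups ++ [tail]
    else groups
  (groups, groups.map pvB_reconstruct)

-- ===== PRECONDITION & SPEC =====
-- Pre_ excludes exactly the inputs where Python A raises IndexError: matrices whose tuples with
-- first component 0 or 1 number exactly one (the reverse cleanup then does final[-1] on an empty
-- list), and matrices where such a tuple's second component falls outside alphabet index range.
def Pre_syllable_identifier (matrixdata : String × (List (Int × Int))) : Prop :=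
  ((matrixdata.2.filter (fun t => t.1 == 0 || t.1 == 1)).length ≠ 1) ∧
  (∀ t ∈ matrixdata.2, (t.1 = 0 ∨ t.1 = 1) → (-26 ≤ t.2 ∧ t.2 ≤ 25))
instance (matrixdata : String × (List (Int × Int))) : Decidable (Pre_syllable_identifier matrixdata) := by
  unfold Pre_syllable_identifier; infer_instance

def pvWitness_syllable_identifier : (String × (List (Int × Int))) := ("ab", [(0, 0), (1, 1), (0, 2)])

-- On matrices with exactly one tuple whose first component is 0 or 1 (and its letter index in
-- range), A raises IndexError in the cleanup pass; B returns that tuple as a single group.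
def Raises_syllable_identifier (matrixdata : String × (List (Int × Int))) : Prop :=
  ((matrixdata.2.filter (fun t => t.1 == 0 || t.1 == 1)).length = 1) ∧
  (∀ t ∈ matrixdata.2, (t.1 = 0 ∨ t.1 = 1) → (-26 ≤ t.2 ∧ t.2 ≤ 25))
instance (matrixdata : String × (List (Int × Int))) : Decidable (Raises_syllable_identifier matrixdata) := by
  unfold Raises_syllable_identifier; infer_instance

def pvRaiseWitness_syllable_identifier : (String × (List (Int × Int))) := ("", [(0, 0)])
def pvRaiseWitnessOut_syllable_identifier : (List (List (Int × Int))) × List String := ([[(0, 0)]], ["a"])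

def Spec_syllable_identifier (matrixdata : String × (List (Int × Int))) (out : (List (List (Int × Int))) × List String) : Prop := out = syllable_identifier_alt matrixdata
instance (matrixdata : String × (List (Int × Int))) (out : (List (List (Int × Int))) × List String) : Decidable (Spec_syllable_identifier matrixdata out) := by unfold Spec_syllable_identifier; infer_instance

-- ===== CLAIM (what is proved, stated in full; the proofs are below) =====
def Claim_equal_syllable_identifier : Prop := ∀ (matrixdata : String × (List (Int × Int))), Dom_syllable_identifier matrixdata → Pre_syllable_identifier matrixdata → Spec_syllable_identifier matrixdata (syllable_identifier matrixdata)

def Claim_raises_syllable_identifier : Prop := (∀ (matrixdata : String × (List (Int × Int))), Dom_syllable_identifier matrixdata → Raises_syllable_identifier matrixdata → ¬ Pre_syllable_identifier matrixdata) ∧ (Dom_syllable_identifier (pvRaiseWitness_syllable_identifier) ∧ Raises_syllable_identifier (pvRaiseWitness_syllable_identifier) ∧ syllable_identifier_alt (pvRaiseWitness_syllable_identifier) = pvRaiseWitnessOut_syllable_identifier)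

-- ===== LEMMAS AND PROOFS =====

-- proof-side simulation of the grouping as ONE stateful fold; A's loop and B's staged slicing
-- are each proved equal to this fold, which yields A = B
def pvSim_step (st : List (List (Int × Int)) × List (Int × Int) × Option Int) (t : Int × Int) :
    List (List (Int × Int)) × List (Int × Int) × Option Int :=
  if t.1 == 1 && st.2.2 == some 0 then (st.1 ++ [st.2.1 ++ [t]], [], some t.1)
  else (st.1, st.2.1 ++ [t], some t.1)

-- invariant carried by the simulation of A's first loop by the sim fold
def pvInv (groups : List (List (Int × Int))) (cur : List (Int × Int)) (prev : Option Int) : Prop :=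
  (∀ g ∈ groups, 2 ≤ g.length) ∧
  (cur = [] → prev ≠ some 0) ∧
  (cur ≠ [] → prev = cur.getLast?.map Prod.fst) ∧
  (∀ t ∈ cur, t.1 = 0 ∨ t.1 = 1)

lemma pvAppendLast_append_singleton (G : List (List (Int × Int))) (C : List (Int × Int)) (x : Int × Int) :
    pvAppendLast (G ++ [C]) x = G ++ [C ++ [x]] := by
  induction G with
  | nil => simp [pvAppendLast]
  | cons g rest ih =>
    cases rest with
    | nil => simp [pvAppendLast]
    | cons h t => simp [pvAppendLast] at ih ⊢; exact ih

lemma loop_sim (l : List (Int × Int)) : ∀ groups cur prev, pvInv groups cur prev →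
    l.foldl pvA_step (groups ++ [cur]) =
      ((l.filter fun t => t.1 == 0 || t.1 == 1).foldl pvSim_step (groups, cur, prev)).1 ++
        [((l.filter fun t => t.1 == 0 || t.1 == 1).foldl pvSim_step (groups, cur, prev)).2.1] ∧
    pvInv ((l.filter fun t => t.1 == 0 || t.1 == 1).foldl pvSim_step (groups, cur, prev)).1
          ((l.filter fun t => t.1 == 0 || t.1 == 1).foldl pvSim_step (groups, cur, prev)).2.1
          ((l.filter fun t => t.1 == 0 || t.1 == 1).foldl pvSim_step (groups, cur, prev)).2.2 := by
  induction l with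
  | nil => intro groups cur prev h; exact ⟨rfl, h⟩
  | cons t rest ih =>
    intro groups cur prev hinv
    obtain ⟨h2le, hemp, hlast, hmem⟩ := hinv
    have hlastD : ((groups ++ [cur]).getLast?).getD [] = cur := by simp
    by_cases h0 : t.1 = 0
    · -- c == 0 : both sides append t to cur
      have hA : pvA_step (groups ++ [cur]) t = groups ++ [cur ++ [t]] := by
        simp [pvA_step, h0, pvAppendLast_append_singleton]
      have hfil : (fun t : Int × Int => t.1 == 0 || t.1 == 1) t = true := by simp [h0]
      have hB : pvSim_step (groups, cur, prev) t = (groups, cur ++ [t], some t.1) := by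
        simp [pvSim_step, h0]
      simp only [List.foldl_cons, List.filter_cons, hfil, if_pos, hA, hB]
      exact ih groups (cur ++ [t]) (some t.1)
        ⟨h2le, by simp, by intro _; simp [h0],
         by intro u hu
            rcases List.mem_append.mp hu with h | h
            · exact hmem u h
            · simp at h; subst h; exact Or.inl h0⟩
    · by_cases h1 : t.1 = 1
      · have hfil : (fun t : Int × Int => t.1 == 0 || t.1 == 1) t = true := by simp [h1]
        rcases List.eq_nil_or_concat cur with hcur | ⟨c0, z, hcur⟩
        · -- cur is empty: branch 2 fires; the sim fold does not split (prev ≠ some 0)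
          subst hcur
          have hpz : (prev == some (0 : Int)) = false := by
            rcases prev with _ | p
            · rfl
            · have := hemp rfl
              simp only [beq_eq_false_iff_ne]; exact this
          have hA : pvA_step (groups ++ [[]]) t = groups ++ [[t]] := by
            simp [pvA_step, h1, pvAppendLast_append_singleton]
          have hB : pvSim_step (groups, [], prev) t = (groups, [t], some t.1) := by
            simp [pvSim_step, hpz]
          simp only [List.foldl_cons, List.filter_cons, hfil, if_pos, hA, hB]
          exact ih groups [t] (some t.1)
            ⟨h2le, by simp, by intro _; simp [h1], by intro u hu; simp at hu; subst hu; exact Or.inr h1⟩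
        · rw [List.concat_eq_append] at hcur
          subst hcur
          have hz01 : z.1 = 0 ∨ z.1 = 1 := hmem z (by simp)
          have hzlast : (c0 ++ [z]).getLast? = some z := by simp
          have hprev : prev = some z.1 := by
            have := hlast (by simp)
            rw [hzlast] at this; simpa using this
          rcases hz01 with hz | hz
          · -- last of cur is 0, incoming 1: A closes the group and opens a new one; sim splits
            have hA : pvA_step (groups ++ [c0 ++ [z]]) t
                = (groups ++ [(c0 ++ [z]) ++ [t]]) ++ [[]] := by
              simp [pvA_step, h1, hz, pvAppendLast_append_singleton]
            have hB : pvSim_step (groups, c0 ++ [z], prev) t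
                = (groups ++ [(c0 ++ [z]) ++ [t]], [], some t.1) := by
              simp [pvSim_step, h1, hprev, hz]
            simp only [List.foldl_cons, List.filter_cons, hfil, if_pos, hA, hB]
            exact ih (groups ++ [(c0 ++ [z]) ++ [t]]) [] (some t.1)
              ⟨by intro g hg
                  rcases List.mem_append.mp hg with h | h
                  · exact h2le g h
                  · simp at h; subst h; simp
               , by intro _; simp [h1], by intro h; exact absurd rfl h, by intro u hu; simp at hu⟩
          · -- last of cur is 1, incoming 1: both just append
            have hA : pvA_step (groups ++ [c0 ++ [z]]) t = groups ++ [(c0 ++ [z]) ++ [t]] := by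
              simp [pvA_step, h1, hz, pvAppendLast_append_singleton]
            have hB : pvSim_step (groups, c0 ++ [z], prev) t
                = (groups, (c0 ++ [z]) ++ [t], some t.1) := by
              simp [pvSim_step, hprev, hz]
            simp only [List.foldl_cons, List.filter_cons, hfil, if_pos, hA, hB]
            exact ih groups ((c0 ++ [z]) ++ [t]) (some t.1)
              ⟨h2le, by simp, by intro _; simp [h1],
               by intro u hu
                  rcases List.mem_append.mp hu with h | h
                  · exact hmem u h
                  · simp at h; subst h; exact Or.inr h1⟩
      · -- first component neither 0 nor 1: A's chain falls through, the filter drops t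
        have hA : pvA_step (groups ++ [cur]) t = groups ++ [cur] := by
          simp [pvA_step, h0, h1]
        have hfil : (fun t : Int × Int => t.1 == 0 || t.1 == 1) t = false := by simp [h0, h1]
        simp only [List.foldl_cons, List.filter_cons, hfil, hA, Bool.false_eq_true, if_false]
        exact ih groups cur prev ⟨h2le, hemp, hlast, hmem⟩

lemma sum_foldSim (l : List (Int × Int)) : ∀ groups cur prev,
    (((l.foldl pvSim_step (groups, cur, prev)).1.map List.length).sum +
      (l.foldl pvSim_step (groups, cur, prev)).2.1.length)
    = (groups.map List.length).sum + cur.length + l.length := by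
  induction l with
  | nil => intro groups cur prev; simp
  | cons t rest ih =>
    intro groups cur prev
    by_cases hb : (t.1 == 1 && (prev == some 0)) = true
    · simp only [List.foldl_cons, pvSim_step, hb, if_true]
      rw [ih]; simp; omega
    · simp only [List.foldl_cons, pvSim_step, hb, Bool.false_eq_true, if_false]
      rw [ih]; simp; omega

lemma cleanup_noop : ∀ (n : Nat) (l : List (List (Int × Int))),
    (∀ i, i < n → 2 ≤ (l.getD i []).length) → pvA_cleanup n l = l := by
  intro n
  induction n with
  | zero => intro l _; rfl
  | succ m ih =>
    intro l h
    have h2 : 2 ≤ (l.getD m []).length := h m (Nat.lt_succ_self m)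
    have e0 : ((l.getD m []).length == 0) = false := by
      rw [beq_eq_false_iff_ne]; omega
    have e1 : ((l.getD m []).length == 1) = false := by
      rw [beq_eq_false_iff_ne]; omega
    simp only [pvA_cleanup, e0, e1, Bool.false_eq_true]
    exact ih l (fun i hi => h i (Nat.lt_succ_of_lt hi))

lemma getD_two_le (l : List (List (Int × Int))) (h : ∀ g ∈ l, 2 ≤ g.length)
    (i : Nat) (hi : i < l.length) : 2 ≤ (l.getD i []).length := by
  rw [List.getD_eq_getElem _ _ hi]; exact h _ (List.getElem_mem _)

lemma pvAppendLast_length (G : List (List (Int × Int))) (x : Int × Int) :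
    (pvAppendLast G x).length = G.length := by
  induction G with
  | nil => rfl
  | cons g rest ih =>
    cases rest with
    | nil => rfl
    | cons h t => simp only [pvAppendLast, List.length_cons] at ih ⊢; rw [ih]

lemma pvAppendLast_two_le (G : List (List (Int × Int))) (x : Int × Int)
    (h : ∀ g ∈ G, 2 ≤ g.length) : ∀ g ∈ pvAppendLast G x, 2 ≤ g.length := by
  induction G with
  | nil => simp [pvAppendLast]
  | cons g rest ih =>
    cases rest with
    | nil =>
      intro g' hg'
      simp only [pvAppendLast, List.mem_singleton] at hg'
      subst hg'
      have := h g (by simp)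
      simp; omega
    | cons h2 t =>
      intro g' hg'
      simp only [pvAppendLast, List.mem_cons] at hg'
      rcases hg' with rfl | hg'
      · exact h g' (by simp)
      · exact ih (fun g hg => h g (List.mem_cons_of_mem _ hg)) g' hg'

lemma eraseIdx_append_singleton (G : List (List (Int × Int))) (C : List (Int × Int)) :
    (G ++ [C]).eraseIdx G.length = G := by
  rw [List.eraseIdx_append_of_length_le (le_refl _)]; simp

lemma cleanup_spec (G : List (List (Int × Int))) (C : List (Int × Int))
    (hG : ∀ g ∈ G, 2 ≤ g.length) (hx : ¬(G = [] ∧ C.length = 1)) :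
    pvA_cleanup (G ++ [C]).length (G ++ [C]) =
      (if C.length == 1 && !G.isEmpty then pvAppendLast G (C.getD 0 (0, 0))
       else if !C.isEmpty then G ++ [C]
       else G) := by
  have hlen : (G ++ [C]).length = G.length + 1 := by simp
  have hgetC : (G ++ [C]).getD G.length [] = C := by simp
  have hnoopG : ∀ i, i < G.length → 2 ≤ (G.getD i []).length :=
    fun i hi => getD_two_le G hG i hi
  rw [hlen]
  simp only [pvA_cleanup, hgetC, eraseIdx_append_singleton]
  rcases hC : C with _ | ⟨x, _ | ⟨y, rest⟩⟩
  · -- C = []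
    simp only [List.length_nil]
    rw [if_pos (by decide)]
    rw [cleanup_noop G.length G hnoopG]
    simp
  · -- C = [x]
    have hGne : G ≠ [] := fun hGnil => hx ⟨hGnil, by rw [hC]; rfl⟩
    simp only [List.length_cons, List.length_nil]
    rw [if_neg (by decide), if_pos (by decide)]
    show pvA_cleanup G.length (pvAppendLast G ([x].getD 0 (0, 0))) = _
    rw [cleanup_noop G.length (pvAppendLast G ([x].getD 0 (0, 0)))
      (fun i hi => getD_two_le _ (pvAppendLast_two_le G ([x].getD 0 (0, 0)) hG) i
        (by rw [pvAppendLast_length]; exact hi))]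
    have : (G.isEmpty : Bool) = false := by
      cases G with | nil => exact absurd rfl hGne | cons a b => rfl
    simp [this]
  · -- C has ≥ 2 elements
    rw [if_neg (by simp), if_neg (by simp)]
    rw [cleanup_noop G.length (G ++ [x :: y :: rest])
      (fun i hi => by
        have : (G ++ [x :: y :: rest]).getD i [] = G.getD i [] := by
          simp [List.getD_eq_getElem?_getD, List.getElem?_append_left hi]
        rw [this]; exact hnoopG i hi)]
    rw [if_neg (by simp), if_pos (by simp)]

lemma reconstruct_eq (g : List (Int × Int)) : pvA_reconstruct g = pvB_reconstruct g := by
  simp only [pvA_reconstruct, pvB_reconstruct, PySem.List.foldl_append_singleton_eq_map]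
  induction g <;> simp_all

-- ===== the B side: bounds-and-slices equals the sim fold =====

-- consecutive slices of l between a and the successive bounds bs
def pvPieces (l : List (Int × Int)) (a : Int) : List Int → List (List (Int × Int))
  | [] => []
  | b :: bs => PySem.List.slice l (some a) (some b) :: pvPieces l b bs

lemma zip_adj (l : List (Int × Int)) (a : Int) (bs : List Int) :
    (((a :: bs).zip bs).map (fun p => PySem.List.slice l (some p.1) (some p.2)))
      = pvPieces l a bs := by
  induction bs generalizing a with
  | nil => rfl
  | cons b bs ih => simp only [List.zip_cons_cons, List.map_cons, pvPieces, ih]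

lemma pvPieces_snoc (l : List (Int × Int)) (m : Int) (bs : List Int) : ∀ a,
    pvPieces l a (bs ++ [m])
      = pvPieces l a bs ++ [PySem.List.slice l (some (bs.getLastD a)) (some m)] := by
  induction bs with
  | nil => intro a; rfl
  | cons b bs ih =>
    intro a
    simp only [List.cons_append, pvPieces, ih b, List.getLastD_cons]

lemma slice_append_stable (l : List (Int × Int)) (t : Int × Int) (a b : Int)
    (ha : 0 ≤ a) (hb : 0 ≤ b) (hbl : b ≤ (l.length : Int)) :
    PySem.List.slice (l ++ [t]) (some a) (some b) = PySem.List.slice l (some a) (some b) := by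
  rw [PySem.List.slice_toNat _ ha hb, PySem.List.slice_toNat _ ha hb]
  have hbn : b.toNat ≤ l.length := by omega
  by_cases hal : a.toNat ≤ l.length
  · rw [List.drop_append_of_le_length hal]
    exact List.take_append_of_le_length (by simp; omega)
  · have : b.toNat - a.toNat = 0 := by omega
    simp [this]

lemma pvPieces_append_stable (l : List (Int × Int)) (t : Int × Int) (bs : List Int)
    (hbs : ∀ b ∈ bs, 0 ≤ b ∧ b ≤ (l.length : Int)) : ∀ a, 0 ≤ a →
    pvPieces (l ++ [t]) a bs = pvPieces l a bs := by
  induction bs with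
  | nil => intro a _; rfl
  | cons b bs ih =>
    intro a ha
    have hb := hbs b (by simp)
    simp only [pvPieces, slice_append_stable l t a b ha hb.1 hb.2,
      ih (fun c hc => hbs c (by simp [hc])) b hb.1]

lemma slice_snoc_full (l : List (Int × Int)) (t : Int × Int) (a : Int)
    (ha : 0 ≤ a) (hal : a ≤ (l.length : Int)) :
    PySem.List.slice (l ++ [t]) (some a) (some ((l.length : Int) + 1))
      = PySem.List.slice l (some a) (some (l.length : Int)) ++ [t] := by
  rw [PySem.List.slice_toNat _ ha (by omega), PySem.List.slice_toNat _ ha (by positivity)]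
  have h1 : ((l.length : Int) + 1).toNat = l.length + 1 := by omega
  have h2 : ((l.length : Int)).toNat = l.length := by omega
  have han : a.toNat ≤ l.length := by omega
  rw [h1, h2, List.drop_append_of_le_length han]
  rw [List.take_of_length_le (by simp only [List.length_append, List.length_drop,
        List.length_cons, List.length_nil]; omega),
      List.take_of_length_le (by simp only [List.length_drop]; omega)]

lemma slice_refl_nil (l : List (Int × Int)) (a : Int) (ha : 0 ≤ a) :
    PySem.List.slice l (some a) (some a) = [] := by
  rw [PySem.List.slice_toNat _ ha ha]; simp

lemma pvB_cuts_mem (w : List Int) : ∀ c ∈ pvB_cuts w, 2 ≤ c ∧ c ≤ (w.length : Int) := by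
  intro c hc
  simp only [pvB_cuts, List.mem_map, List.mem_filter] at hc
  obtain ⟨k, ⟨hk, _⟩, rfl⟩ := hc
  have := PySem.List.mem_pyRange_one.mp hk
  omega

lemma pvB_cuts_snoc (w : List Int) (c : Int) :
    pvB_cuts (w ++ [c])
      = pvB_cuts w ++ (if c = 1 ∧ w.getLast? = some 0 then [(w.length : Int) + 1] else []) := by
  rcases List.eq_nil_or_concat w with rfl | ⟨w0, z, rfl⟩
  · have h1 : pvB_cuts [c] = [] := by
      simp only [pvB_cuts, List.length_cons, List.length_nil]
      rw [PySem.List.pyRange_one_eq_nil (by norm_num)]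
      rfl
    have h2 : pvB_cuts ([] : List Int) = [] := by
      simp only [pvB_cuts, List.length_nil]
      rw [PySem.List.pyRange_one_eq_nil (by norm_num)]
      rfl
    simp [h1, h2]
  · rw [List.concat_eq_append] at *
    set w := w0 ++ [z] with hw
    have hwlen : 1 ≤ w.length := by simp [hw]
    have hlen' : (((w ++ [c]).length : Nat) : Int) = (w.length : Int) + 1 := by
      simp
    unfold pvB_cuts
    rw [hlen', PySem.List.pyRange_one_succ_right (by exact_mod_cast hwlen)]
    rw [List.filter_append, List.map_append]
    congr 1
    · -- indices below w.length read the same values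
      congr 1
      apply List.filter_congr
      intro k hk
      have hkb := PySem.List.mem_pyRange_one.mp hk
      have e1 : PySem.List.pyGetD (w ++ [c]) k 0 = PySem.List.pyGetD w k 0 := by
        rw [PySem.List.pyGetD_eq_getElem _ _ (by omega) (by simp; omega),
            PySem.List.pyGetD_eq_getElem _ _ (by omega) (by omega)]
        exact List.getElem_append_left (by omega)
      have e2 : PySem.List.pyGetD (w ++ [c]) (k - 1) 0 = PySem.List.pyGetD w (k - 1) 0 := by
        rw [PySem.List.pyGetD_eq_getElem _ _ (by omega) (by simp; omega),
            PySem.List.pyGetD_eq_getElem _ _ (by omega) (by omega)]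
        exact List.getElem_append_left (by omega)
      rw [e1, e2]
    · -- the one new index w.length
      have egetc : PySem.List.pyGetD (w ++ [c]) (w.length : Int) 0 = c := by
        rw [PySem.List.pyGetD_eq_getElem _ _ (by positivity) (by simp)]
        simp
      have hwne : w ≠ [] := by simp [hw]
      have hglast : w.getLast? = some (w.getLast hwne) := List.getLast?_eq_some_getLast hwne
      have egetl : PySem.List.pyGetD (w ++ [c]) ((w.length : Int) - 1) 0
          = w.getLast hwne := by
        rw [PySem.List.pyGetD_eq_getElem _ _ (by omega)
          (by simp only [List.length_append, List.length_cons, List.length_nil,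
                Nat.cast_add, Nat.cast_one]; omega)]
        have hix : ((w.length : Int) - 1).toNat = w.length - 1 := by omega
        rw [List.getLast_eq_getElem]
        simp only [hix]
        exact List.getElem_append_left (by omega)
      simp only [List.filter_cons, List.filter_nil, egetc, egetl]
      by_cases hcond : c = 1 ∧ w.getLast? = some 0
      · have hz0 : w.getLast hwne = 0 := by
          have := hcond.2
          rw [hglast] at this
          exact Option.some_injective _ this
        rw [if_pos hcond]
        simp [hcond.1, hz0]
      · rw [if_neg hcond]
        have : (c == 1 && (w.getLast (by simp [hw])) == 0) = false := by
          by_contra h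
          rw [Bool.not_eq_false, Bool.and_eq_true, beq_iff_eq, beq_iff_eq] at h
          exact hcond ⟨h.1, by rw [hglast, h.2]⟩
        simp [this]

lemma sim_prev_snoc (l : List (Int × Int)) (t : Int × Int)
    (st : List (List (Int × Int)) × List (Int × Int) × Option Int) :
    ((l ++ [t]).foldl pvSim_step st).2.2 = some t.1 := by
  rw [List.foldl_append]
  simp only [List.foldl_cons, List.foldl_nil, pvSim_step]
  split <;> rfl

lemma pieces_eq_sim (l : List (Int × Int)) (hl : ∀ t ∈ l, t.1 = 0 ∨ t.1 = 1) :
    pvPieces l 0 (pvB_cuts (l.map (fun t => t.1)) ++ [((l.map (fun t => t.1)).length : Int)])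
      = (l.foldl pvSim_step ([], [], none)).1 ++ [(l.foldl pvSim_step ([], [], none)).2.1] := by
  induction l using List.reverseRecOn with
  | nil =>
    simp only [List.map_nil, List.length_nil, Nat.cast_zero, List.foldl_nil]
    rw [show pvB_cuts [] = [] from by
      simp only [pvB_cuts, List.length_nil]
      rw [PySem.List.pyRange_one_eq_nil (by norm_num)]
      rfl]
    simp only [List.nil_append, pvPieces]
    rw [slice_refl_nil [] 0 le_rfl]
  | append_singleton l t ih =>
    have hl' : ∀ u ∈ l, u.1 = 0 ∨ u.1 = 1 := fun u hu => hl u (by simp [hu])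
    have ht : t.1 = 0 ∨ t.1 = 1 := hl t (by simp)
    set w := l.map (fun u => u.1) with hwdef
    set st := l.foldl pvSim_step ([], [], none) with hst
    have hmapsnoc : (l ++ [t]).map (fun u => u.1) = w ++ [t.1] := by simp [hwdef]
    have hwlen : (w.length : Int) = (l.length : Int) := by simp [hwdef]
    -- split the IH into its two components
    have ihsplit := ih hl'
    rw [pvPieces_snoc] at ihsplit
    obtain ⟨hGeq, hCeq⟩ := List.append_singleton_inj.mp ihsplit
    rw [hwlen] at hCeq
    have hLbound : 0 ≤ (pvB_cuts w).getLastD 0 ∧ (pvB_cuts w).getLastD 0 ≤ (l.length : Int) := by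
      rcases List.eq_nil_or_concat (pvB_cuts w) with hnil | ⟨cs0, c, hcs⟩
      · rw [hnil]; exact ⟨le_rfl, by positivity⟩
      · rw [List.concat_eq_append] at hcs
        rw [hcs, List.getLastD_concat]
        have := pvB_cuts_mem w c (by rw [hcs]; simp)
        constructor <;> [omega; exact le_of_le_of_eq this.2 hwlen]
    have hcutsbound : ∀ b ∈ pvB_cuts w ++ [(w.length : Int)], 0 ≤ b ∧ b ≤ (l.length : Int) := by
      intro b hb
      rcases List.mem_append.mp hb with hb | hb
      · have := pvB_cuts_mem w b hb; constructor <;> [omega; exact le_of_le_of_eq this.2 hwlen]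
      · simp at hb; subst hb; rw [hwlen]; exact ⟨by positivity, le_rfl⟩
    have hsnoclen : (((w ++ [t.1]).length : Nat) : Int) = (l.length : Int) + 1 := by
      simp [hwdef]
    -- the state transition, phrased through the last element of w
    have hprev_iff : (st.2.2 == some (0 : Int)) = true ↔ w.getLast? = some 0 := by
      rcases List.eq_nil_or_concat l with rfl | ⟨l0, u, rfl⟩
      · simp [hst, hwdef]
      · rw [List.concat_eq_append] at *
        have : st.2.2 = some u.1 := by rw [hst]; exact sim_prev_snoc l0 u _
        rw [this]
        have : w.getLast? = some u.1 := by
          rw [hwdef, List.getLast?_map]; simp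
        rw [this]
        simp
    rw [hmapsnoc, hsnoclen, pvB_cuts_snoc w t.1]
    rw [List.foldl_append, List.foldl_cons, List.foldl_nil]
    by_cases hcond : t.1 = 1 ∧ w.getLast? = some 0
    · -- a split point: close the running piece and open an empty one
      rw [if_pos hcond]
      have hbeq : (t.1 == 1 && st.2.2 == some (0:Int)) = true := by
        rw [Bool.and_eq_true, beq_iff_eq]
        exact ⟨hcond.1, hprev_iff.mpr hcond.2⟩
      rw [show pvSim_step st t = (st.1 ++ [st.2.1 ++ [t]], [], some t.1) from by
        simp only [pvSim_step, hbeq, if_true]]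
      rw [hwlen]
      rw [pvPieces_snoc, pvPieces_snoc]
      rw [List.getLastD_concat]
      have e0 : pvPieces (l ++ [t]) 0 (pvB_cuts w) = pvPieces l 0 (pvB_cuts w) :=
        pvPieces_append_stable l t (pvB_cuts w)
          (fun b hb => hcutsbound b (List.mem_append.mpr (Or.inl hb))) 0 le_rfl
      have e1 : PySem.List.slice (l ++ [t]) (some ((pvB_cuts w).getLastD 0))
          (some ((l.length : Int) + 1)) = st.2.1 ++ [t] := by
        rw [slice_snoc_full l t _ hLbound.1 hLbound.2, hCeq]
      have e2 : PySem.List.slice (l ++ [t]) (some ((l.length : Int) + 1))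
          (some ((l.length : Int) + 1)) = [] := slice_refl_nil _ _ (by positivity)
      rw [e2, e0, e1, hGeq]
    · -- no split: the running piece just grows by t
      rw [if_neg hcond]
      have hbeq : (t.1 == 1 && st.2.2 == some (0:Int)) = false := by
        by_contra h
        rw [Bool.not_eq_false, Bool.and_eq_true, beq_iff_eq] at h
        exact hcond ⟨h.1, hprev_iff.mp h.2⟩
      rw [show pvSim_step st t = (st.1, st.2.1 ++ [t], some t.1) from by
        simp only [pvSim_step, hbeq, Bool.false_eq_true, if_false]]
      rw [List.append_nil, pvPieces_snoc]
      have e0 : pvPieces (l ++ [t]) 0 (pvB_cuts w) = pvPieces l 0 (pvB_cuts w) :=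
        pvPieces_append_stable l t (pvB_cuts w)
          (fun b hb => hcutsbound b (List.mem_append.mpr (Or.inl hb))) 0 le_rfl
      have e1 : PySem.List.slice (l ++ [t]) (some ((pvB_cuts w).getLastD 0))
          (some ((l.length : Int) + 1)) = st.2.1 ++ [t] := by
        rw [slice_snoc_full l t _ hLbound.1 hLbound.2, hCeq]
      rw [e0, e1, hGeq]

-- groups[-1] = groups[-1] + [x] is pvAppendLast on a nonempty list
lemma setLast_eq_appendLast (G : List (List (Int × Int))) (x : Int × Int) (h : G ≠ []) :
    G.dropLast ++ [G.getLastD [] ++ [x]] = pvAppendLast G x := by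
  induction G with
  | nil => exact absurd rfl h
  | cons g rest ih =>
    cases rest with
    | nil => simp [pvAppendLast]
    | cons g2 r =>
      simp only [pvAppendLast, List.dropLast_cons₂, List.cons_append]
      rw [← ih (by simp)]
      simp

-- ===== VERDICT (by name: the statement is the Claim_ definition above) =====
theorem syllable_identifier_spec : Claim_equal_syllable_identifier := by
  intro md _ hpre
  unfold Spec_syllable_identifier syllable_identifier syllable_identifier_alt
  simp only [List.length_map]
  rw [PySem.List.foldl_pyRange_zero_pyGetD' md.2 ((0:Int),(0:Int)) pvA_step]
  have hinv0 : pvInv [] [] none :=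
    ⟨by simp, fun _ => by simp, fun h => absurd rfl h, by simp⟩
  obtain ⟨heq, hinv⟩ := loop_sim md.2 [] [] none hinv0
  rw [List.nil_append] at heq
  rw [heq]
  set kept := md.2.filter (fun t => t.1 == 0 || t.1 == 1) with hkept
  set st := kept.foldl pvSim_step ([], [], none) with hst
  have hx : ¬(st.1 = [] ∧ st.2.1.length = 1) := by
    rintro ⟨hG, hC⟩
    have hs := sum_foldSim kept [] [] none
    rw [← hst, hG, hC] at hs
    simp at hs
    exact hpre.1 hs.symm
  rw [cleanup_spec _ _ hinv.1 hx]
  -- B side: bounds/zip/slices = sim fold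
  have hkeptmem : ∀ t ∈ kept, t.1 = 0 ∨ t.1 = 1 := by
    intro t ht
    have := (List.mem_filter.mp ht).2
    rw [Bool.or_eq_true, beq_iff_eq, beq_iff_eq] at this
    exact this
  have hpieces : ((((0 : Int) :: (pvB_cuts (kept.map (fun t => t.1)) ++
        [(kept.length : Int)])).zip
        (pvB_cuts (kept.map (fun t => t.1)) ++ [(kept.length : Int)])).map
        (fun p => PySem.List.slice kept (some p.1) (some p.2)))
      = st.1 ++ [st.2.1] := by
    rw [zip_adj]
    have h := pieces_eq_sim kept hkeptmem
    simpa using h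
  simp only [List.tail_cons] at *
  rw [hpieces]
  rw [List.dropLast_concat, List.getLastD_concat]
  -- match the trailing-piece patch with A's cleanup result
  by_cases hc1 : (st.2.1.length == 1 && !st.1.isEmpty) = true
  · rw [if_pos hc1, if_pos hc1]
    have hGne : st.1 ≠ [] := by
      rcases Bool.and_eq_true .. |>.mp hc1 with ⟨_, h⟩
      simp only [Bool.not_eq_true'] at h
      exact fun hh => by rw [hh] at h; simp at h
    rw [setLast_eq_appendLast st.1 _ hGne]
    have : st.2.1.headD (0, 0) = st.2.1.getD 0 (0, 0) := by
      cases st.2.1 <;> rfl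
    rw [this]
    rw [show pvA_reconstruct = pvB_reconstruct from funext reconstruct_eq]
  · rw [if_neg hc1, if_neg hc1]
    rw [show pvA_reconstruct = pvB_reconstruct from funext reconstruct_eq]

def syllable_identifier_raises : Claim_raises_syllable_identifier := by
  unfold Claim_raises_syllable_identifier
  exact ⟨by intro m _ hr hp; exact hp.1 hr.1, by decide⟩
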